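-- pv_equiv track=rewrite | github.com/fastyangmh/LeetCode | Python/3884. First Matching Character From Both Ends.py | firstMatchingIndex
-- ===== SOURCE A (Python) =====
-- def firstMatchingIndex(s: str) -> int:
--     l, r = 0, len(s) - 1
--
--     while l <= r:
--         if s[l] == s[r]:
--             return l
--         l += 1
--         r -= 1
--     return -1
-- ===== SOURCE B (Python) =====
-- def firstMatchingIndex(s: str) -> int:
--     def peel(cs):
--         if not cs:
--             return -1
--         if cs[0] == cs[-1]:
--             return 0
--         inner = peel(cs[1:-1])
--         return -1 if inner == -1 else inner + 1
--     return peel(list(s))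
-- ===== Notes on version B (the rewrite author's own statement) =====
-- stated objective: alternative
-- what changed: Replaces the iterative two-pointer loop over fixed indices with a recursion that structurally peels the outer pair off a shrinking slice, returning 0 on a match and rebuilding the absolute index as inner+1 on the way back up.
import Mathlib
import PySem

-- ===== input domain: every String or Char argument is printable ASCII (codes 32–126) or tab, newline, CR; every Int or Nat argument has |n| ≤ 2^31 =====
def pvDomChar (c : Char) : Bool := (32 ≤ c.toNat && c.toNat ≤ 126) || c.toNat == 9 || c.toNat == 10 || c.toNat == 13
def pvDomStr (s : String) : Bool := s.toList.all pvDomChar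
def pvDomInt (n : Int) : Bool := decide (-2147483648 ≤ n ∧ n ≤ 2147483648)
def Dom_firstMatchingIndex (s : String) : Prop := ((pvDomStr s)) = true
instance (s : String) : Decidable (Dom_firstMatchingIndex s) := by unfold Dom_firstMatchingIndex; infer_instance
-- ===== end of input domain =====

-- B replaces A's two-pointer index loop by a recursion that peels the outer
-- character pair off a shrinking slice, rebuilding the index as inner+1 on the
-- way back (alternative decomposition; same return value on every string).

-- ===== PORT A =====
-- A's while loop with the two pointers l, r.
def firstMatchingIndexGo (cs : List Char) (l r : Int) : Int :=
  if l ≤ r then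
    if PySem.List.pyGet? cs l = PySem.List.pyGet? cs r then l
    else firstMatchingIndexGo cs (l + 1) (r - 1)
  else -1
termination_by (r - l + 1).toNat
decreasing_by omega

def firstMatchingIndex (s : String) : Int :=
  firstMatchingIndexGo s.toList 0 ((s.toList.length : Int) - 1)

-- ===== PORT B =====
-- peel(cs): [] -> -1; cs[0]==cs[-1] -> 0; else -1/inner+1 from peel(cs[1:-1]).
-- cs[1:-1] on a nonempty list is (drop 1).dropLast (exact for Python's slice here).
def fmiPeel (cs : List Char) : Int :=
  match cs with
  | [] => -1
  | c :: rest =>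
    if c = (c :: rest).getLast (by simp) then 0
    else
      let inner := fmiPeel rest.dropLast
      if inner = -1 then -1 else inner + 1
termination_by cs.length
decreasing_by simp [List.length_dropLast]

def firstMatchingIndex_alt (s : String) : Int := fmiPeel s.toList

-- ===== PRECONDITION & SPEC =====
def Spec_firstMatchingIndex (s : String) (out : Int) : Prop := out = firstMatchingIndex_alt s
instance (s : String) (out : Int) : Decidable (Spec_firstMatchingIndex s out) := by unfold Spec_firstMatchingIndex; infer_instance

-- ===== CLAIM (what is proved, stated in full; the proofs are below) =====
def Claim_equal_firstMatchingIndex : Prop := ∀ (s : String), Dom_firstMatchingIndex s → Spec_firstMatchingIndex s (firstMatchingIndex s)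

-- ===== LEMMAS AND PROOFS =====

-- A's loop on c :: mid ++ [d] with both pointers shifted in by one behaves like
-- the loop on mid, with a successful index shifted up by one.
theorem fmiGo_shift (mid : List Char) (c d : Char) :
    ∀ l r : Int, 0 ≤ l → r < (mid.length : Int) →
      firstMatchingIndexGo (c :: mid ++ [d]) (l + 1) (r + 1) =
        (if firstMatchingIndexGo mid l r = -1 then -1 else firstMatchingIndexGo mid l r + 1) := by
  intro l r hl hr
  induction h : (r - l + 1).toNat using Nat.strong_induction_on generalizing l r with
  | _ m ih =>
    by_cases hle : l ≤ r
    · have hlm : l.toNat < mid.length := by omega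
      have hrm : r.toNat < mid.length := by omega
      have hgl : PySem.List.pyGet? (c :: mid ++ [d]) (l + 1) = mid[l.toNat]? := by
        rw [PySem.List.pyGet?_of_nonneg _ (by omega),
            show (l + 1).toNat = l.toNat + 1 by omega]
        simp [List.getElem?_append, hlm]
      have hgr : PySem.List.pyGet? (c :: mid ++ [d]) (r + 1) = mid[r.toNat]? := by
        rw [PySem.List.pyGet?_of_nonneg _ (by omega),
            show (r + 1).toNat = r.toNat + 1 by omega]
        simp [List.getElem?_append, hrm]
      have hml : PySem.List.pyGet? mid l = mid[l.toNat]? :=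
        PySem.List.pyGet?_of_nonneg _ (by omega)
      have hmr : PySem.List.pyGet? mid r = mid[r.toNat]? :=
        PySem.List.pyGet?_of_nonneg _ (by omega)
      rw [firstMatchingIndexGo, if_pos (by omega : l + 1 ≤ r + 1), hgl, hgr]
      conv_rhs => rw [firstMatchingIndexGo, if_pos hle, hml, hmr]
      by_cases heq : mid[l.toNat]? = mid[r.toNat]?
      · rw [if_pos heq, if_pos heq, if_neg (by omega : ¬ (l : Int) = -1)]
      · rw [if_neg heq, if_neg heq,
            show l + 1 + 1 = (l + 1) + 1 by ring,
            show r + 1 - 1 = (r - 1) + 1 by ring]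
        exact ih (r - 1 - (l + 1) + 1).toNat (by omega) (l + 1) (r - 1) (by omega) (by omega) rfl
    · rw [firstMatchingIndexGo, if_neg (by omega : ¬ l + 1 ≤ r + 1)]
      conv_rhs => rw [firstMatchingIndexGo, if_neg hle]
      simp

theorem fmiPeel_eq_go :
    ∀ cs : List Char, fmiPeel cs = firstMatchingIndexGo cs 0 ((cs.length : Int) - 1) := by
  intro cs
  induction h : cs.length using Nat.strong_induction_on generalizing cs with
  | _ m ih =>
    match cs with
    | [] =>
      subst h
      simp only [fmiPeel]
      rw [firstMatchingIndexGo]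
      norm_num
    | c :: rest =>
      subst h
      have hlen : ((c :: rest).length : Int) - 1 = (rest.length : Int) := by simp
      have hget0 : PySem.List.pyGet? (c :: rest) 0 = some c := by
        rw [show (0 : Int) = ((0 : Nat) : Int) by norm_num, PySem.List.pyGet?_natCast]
        simp
      have hgetLast : PySem.List.pyGet? (c :: rest) ((rest.length : Int)) =
          some ((c :: rest).getLast (by simp)) := by
        rw [show ((rest.length : Int)) = ((rest.length : Nat) : Int) by norm_num,
            PySem.List.pyGet?_natCast]
        rw [List.getLast_eq_getElem]
        simp
        rfl
      simp only [fmiPeel]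
      rw [hlen, firstMatchingIndexGo, hget0, hgetLast,
          if_pos (show (0 : Int) ≤ (rest.length : Int) from Int.natCast_nonneg _)]
      by_cases heq : c = (c :: rest).getLast (by simp)
      · rw [if_pos heq,
            if_pos (show some c = some ((c :: rest).getLast (by simp)) from congrArg some heq)]
      · rw [if_neg heq,
            if_neg (show ¬ some c = some ((c :: rest).getLast (by simp)) from by simpa using heq)]
        have hrne : rest ≠ [] := by
          intro hnil
          subst hnil
          simp [List.getLast] at heq
        obtain ⟨mid, d, hmd⟩ : ∃ mid d, rest = mid ++ [d] := by
          rcases List.eq_nil_or_concat rest with h0 | ⟨mid, d, h1⟩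
          · exact absurd h0 hrne
          · exact ⟨mid, d, by simpa using h1⟩
        have hmidlen : rest.dropLast = mid := by rw [hmd]; simp
        have hshift := fmiGo_shift mid c d 0 ((mid.length : Int) - 1) le_rfl (by omega)
        rw [hmd,
            show ((mid ++ [d]).length : Int) - 1 = ((mid.length : Int) - 1) + 1 by
              simp only [List.length_append, List.length_cons, List.length_nil]
              push_cast
              ring,
            show (mid ++ [d]).dropLast = mid by simp,
            ih mid.length (by
              simp only [hmd, List.length_cons, List.length_append, List.length_nil]
              omega) mid rfl,
            ← List.cons_append, hshift]

-- ===== VERDICT (by name: the statement is the Claim_ definition above) =====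
theorem firstMatchingIndex_spec : Claim_equal_firstMatchingIndex := by
  unfold Claim_equal_firstMatchingIndex Spec_firstMatchingIndex
  intro s _
  unfold firstMatchingIndex firstMatchingIndex_alt
  exact (fmiPeel_eq_go s.toList).symm
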